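-- pv_equiv track=rewrite | github.com/dbarr0s/PL2025 | TPC2/tpc2.py | obras_por_periodo
-- ===== SOURCE A (Python) =====
-- def obras_por_periodo(header, dados):
--     index_periodo = header.index("periodo")  # Índice da coluna 'periodo'
--     index_nome = header.index("nome")  # Índice da coluna 'nome'
--
--     periodos = {}
--
--     for linha in dados:
--         periodo = linha[index_periodo]
--         nome = linha[index_nome]
--
--         if periodo not in periodos:
--             periodos[periodo] = []
--
--         periodos[periodo].append(nome)
--
--     # Ordenar alfabeticamente as obras em cada período
--     for periodo in periodos:
--         periodos[periodo].sort()
--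
--     return periodos
-- ===== SOURCE B (Python) =====
-- def obras_por_periodo(header, dados):
--     index_periodo = header.index("periodo")
--     index_nome = header.index("nome")
--     pares = [(linha[index_periodo], linha[index_nome]) for linha in dados]
--     return {p: sorted(nome for q, nome in pares if q == p)
--             for p in dict.fromkeys(q for q, _ in pares)}
-- ===== Notes on version B (the rewrite author's own statement) =====
-- stated objective: simpler
-- what changed: A accumulates names into a dict in one pass and then sorts each group in place; B instead dedups the periods in first-occurrence order and builds the result as a dict comprehension with a per-period filter + sorted, removing the mutable-dict accumulation and the in-place sort loop.
-- outside the precondition, e.g. on obras_por_periodo(['nome'], [['a']]): A raises ValueError, B raises ValueError; on obras_por_periodo(['periodo', 'nome'], [['x']]): A raises IndexError, B raises IndexError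
import Mathlib
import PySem

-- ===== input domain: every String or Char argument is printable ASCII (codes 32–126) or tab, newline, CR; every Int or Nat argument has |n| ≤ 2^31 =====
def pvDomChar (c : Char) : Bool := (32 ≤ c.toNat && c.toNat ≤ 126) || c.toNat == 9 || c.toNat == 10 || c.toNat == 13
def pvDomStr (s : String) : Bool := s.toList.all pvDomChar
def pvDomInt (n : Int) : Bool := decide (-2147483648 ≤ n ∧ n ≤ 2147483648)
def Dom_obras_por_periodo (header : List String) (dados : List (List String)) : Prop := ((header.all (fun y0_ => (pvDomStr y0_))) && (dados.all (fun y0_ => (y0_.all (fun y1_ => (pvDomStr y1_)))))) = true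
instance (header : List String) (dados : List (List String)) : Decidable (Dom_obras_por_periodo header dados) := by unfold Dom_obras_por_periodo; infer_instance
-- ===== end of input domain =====

-- B replaces A's single-pass dict accumulation + per-group in-place sort by a dict comprehension
-- over the deduped periods with a per-period filter + sorted (objective: simpler; not faster).

-- ===== PORT A =====
-- one dados-loop building the dict (the 'if periodo not in: … = []' + append idiom is Dict.modify
-- with default []), then a loop over the keys sorting each group in place, then the dict's items.
def obras_por_periodo (header : List String) (dados : List (List String)) : List (String × List String) :=
  match PySem.List.index? header "periodo", PySem.List.index? header "nome" with
  | some ip, some im =>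
      let d : PySem.Dict String (List String) :=
        dados.foldl (fun d linha =>
          d.modify (PySem.List.pyGetD linha (ip : Int) "") []
            (· ++ [PySem.List.pyGetD linha (im : Int) ""])) PySem.Dict.empty
      let d2 := d.keys.foldl (fun d k =>
        d.modify k [] (fun l => PySem.List.sorted l (fun x => x) false)) d
      d2.items
  | _, _ => []   -- header.index raises ValueError: excluded by Pre_

-- ===== PORT B =====
def obras_por_periodo_alt (header : List String) (dados : List (List String)) : List (String × List String) :=
  match PySem.List.index? header "periodo" with
  | none => []   -- header.index raises ValueError: excluded by Pre_
  | some ip =>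
    match PySem.List.index? header "nome" with
    | none => []   -- header.index raises ValueError: excluded by Pre_
    | some im =>
      let pares := dados.map (fun linha =>
        (PySem.List.pyGetD linha (ip : Int) "", PySem.List.pyGetD linha (im : Int) ""))
      (PySem.List.dedup (pares.map Prod.fst)).map (fun p =>
        (p, PySem.List.sorted ((pares.filter (fun q => q.1 == p)).map (·.2)) (fun x => x) false))

-- ===== PRECONDITION & SPEC =====
-- Pre_ excludes exactly where Python A raises: a header missing "periodo" or "nome" (ValueError),
-- or a row too short for one of those two column indices (IndexError).
def Pre_obras_por_periodo (header : List String) (dados : List (List String)) : Prop :=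
  "periodo" ∈ header ∧ "nome" ∈ header ∧
  ∀ linha ∈ dados, header.idxOf "periodo" < linha.length ∧ header.idxOf "nome" < linha.length
instance (header : List String) (dados : List (List String)) : Decidable (Pre_obras_por_periodo header dados) := by unfold Pre_obras_por_periodo; infer_instance
def pvWitness_obras_por_periodo : List String × List (List String) :=
  (["nome", "periodo"], [["Ana", "barroco"], ["Zed", "barroco"], ["Bo", "romantico"]])

def Spec_obras_por_periodo (header : List String) (dados : List (List String)) (out : List (String × List String)) : Prop := out = obras_por_periodo_alt header dados
instance (header : List String) (dados : List (List String)) (out : List (String × List String)) : Decidable (Spec_obras_por_periodo header dados out) := by unfold Spec_obras_por_periodo; infer_instance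

-- ===== CLAIM (what is proved, stated in full; the proofs are below) =====
def Claim_equal_obras_por_periodo : Prop := ∀ (header : List String) (dados : List (List String)), Dom_obras_por_periodo header dados → Pre_obras_por_periodo header dados → Spec_obras_por_periodo header dados (obras_por_periodo header dados)

-- ===== LEMMAS AND PROOFS =====

-- keys are unchanged by A's second loop (it only re-assigns existing keys' values)
theorem keys_foldl_sort (d : PySem.Dict String (List String)) :
    (d.keys.foldl (fun d k => d.modify k [] (fun l => PySem.List.sorted l (fun x => x) false)) d).keys = d.keys := by
  rw [PySem.Dict.keys_foldl_modify (f := fun _ _ => (fun l => PySem.List.sorted l (fun x => x) false))]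
  rw [PySem.Set.update_eq_append_filter]
  have h : (PySem.Set.ofList d.keys).filter (fun y => !(PySem.Set.contains d.keys y)) = [] := by
    rw [List.filter_eq_nil_iff]
    intro y hy
    have : y ∈ d.keys := (PySem.Set.mem_ofList _ _).mp hy
    simp [this]
  rw [h, List.append_nil]

-- A's second loop sorts the group of each key occurring in ks (ks nodup), leaves others alone
theorem getD_foldl_sort (ks : List String) (hnd : ks.Nodup) (d : PySem.Dict String (List String)) (c : String) :
    (ks.foldl (fun d k => d.modify k [] (fun l => PySem.List.sorted l (fun x => x) false)) d).getD c []
      = if c ∈ ks then PySem.List.sorted (d.getD c []) (fun x => x) false else d.getD c [] := by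
  induction ks generalizing d with
  | nil => simp
  | cons k ks ih =>
      simp only [List.foldl_cons]
      rcases List.nodup_cons.mp hnd with ⟨hk, hnd'⟩
      rw [ih hnd']
      by_cases hc : c = k
      · subst hc
        simp [hk]
      · simp [PySem.Dict.getD_modify, hc]

theorem obras_por_periodo_eq_alt (header : List String) (dados : List (List String)) :
    obras_por_periodo header dados = obras_por_periodo_alt header dados := by
  unfold obras_por_periodo obras_por_periodo_alt
  cases hp : PySem.List.index? header "periodo" with
  | none => rfl
  | some ip =>
    cases hn : PySem.List.index? header "nome" with
    | none => rfl
    | some im =>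
      simp only
      set f : List String → String × String := fun linha =>
        (PySem.List.pyGetD linha (ip : Int) "", PySem.List.pyGetD linha (im : Int) "") with hf
      set pares := dados.map f with hpares
      have hfold : dados.foldl (fun d linha =>
            d.modify (PySem.List.pyGetD linha (ip : Int) "") []
              (· ++ [PySem.List.pyGetD linha (im : Int) ""])) PySem.Dict.empty
          = pares.foldl (fun d p => d.modify p.1 [] (· ++ [p.2])) PySem.Dict.empty := by
        rw [hpares, List.foldl_map]
      rw [hfold]
      set d := pares.foldl (fun d p => d.modify p.1 [] (· ++ [p.2])) PySem.Dict.empty with hd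
      have hkeys : d.keys = PySem.Set.ofList (pares.map Prod.fst) := by
        rw [hd, PySem.Dict.keys_foldl_modify_key]
        rfl
      have hndk : d.keys.Nodup := by
        rw [hkeys]; exact PySem.Set.nodup_ofList _
      have hgetD : ∀ c, d.getD c [] = (pares.filter (fun q => q.1 == c)).map (·.2) := by
        intro c
        rw [hd, PySem.Dict.getD_foldl_modify_append]
        simp
      have hnd2 : (d.keys.foldl (fun d k =>
          d.modify k [] (fun l => PySem.List.sorted l (fun x => x) false)) d).keys.Nodup := by
        rw [keys_foldl_sort]; exact hndk
      rw [PySem.Dict.items_eq_map_keys _ hnd2 [], keys_foldl_sort, PySem.List.dedup_eq_ofList, ← hkeys]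
      apply List.map_congr_left
      intro p hp
      rw [getD_foldl_sort d.keys hndk d p, if_pos hp, hgetD]

-- ===== VERDICT (by name: the statement is the Claim_ definition above) =====
theorem obras_por_periodo_spec : Claim_equal_obras_por_periodo := by
  intro header dados _ _
  exact obras_por_periodo_eq_alt header dados
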